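-- pv_equiv track=rewrite | github.com/MayFly404/AP_CSP_War_Simulation | main.py | split_grid
-- ===== SOURCE A (Python) =====
-- def split_grid(grid: list, countries: list) -> list:
--     """
--     Splits a grid into territories and assigns them to countries, retaining the original grid's shape.
--
--     Args:
--         grid (list): A 2D list representing the grid to be divided. Each element
--                      of the grid is a row containing cells.
--         countries (list): A list of unique country identifiers (strings or other values)
--                           that represent the countries to which the grid territories
--                           will be assigned.
--
--     Returns:
--         list: A new 2D list (grid) with the same dimensions as the input grid,
--               where each cell contains the country assigned to that territory.
--               If `countries` is empty, the original grid is returned unchanged.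
--     """
--     if not countries:
--         return grid
--
--     rows: int = len(grid)          # Number of rows in the grid
--     cols: int = len(grid[0])       # Number of columns in the grid
--     total_cells: int = rows * cols # Total number of cells in the grid
--     country_count: int = len(countries)
--
--     # Calculate the number of cells each country should occupy
--     cells_per_country: int = total_cells // country_count
--     extra_cells: int = total_cells % country_count
--
--     # Flatten the grid into a list of cells for assignment
--     flat_grid = [None] * total_cells
--     current_country_index = 0
--     cell_count = 0
--
--     # Assign each cell to a country, distributing extra cells as needed
--     for i in range(total_cells):
--         flat_grid[i] = countries[current_country_index]
--         cell_count += 1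
--
--         # Move to the next country when its quota is filled
--         if cell_count >= cells_per_country + (1 if extra_cells > 0 else 0):
--             cell_count = 0
--             current_country_index += 1
--             if extra_cells > 0:
--                 extra_cells -= 1
--
--     # Reshape the flat list back into the original grid dimensions
--     divided_grid = [
--         flat_grid[row * cols:(row + 1) * cols] for row in range(rows)
--     ]
--
--     return divided_grid
-- ===== SOURCE B (Python) =====
-- def split_grid(grid: list, countries: list) -> list:
--     if not countries:
--         return grid
--     rows = len(grid)
--     cols = len(grid[0])
--     q, r = divmod(rows * cols, len(countries))
--
--     def owner(i: int) -> int: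
--         # cells 0..r*(q+1)-1 belong to the first r countries (q+1 cells each);
--         # the rest belong to the remaining countries (q cells each)
--         return i // (q + 1) if i < r * (q + 1) else r + (i - r * (q + 1)) // q
--
--     return [[countries[owner(row * cols + col)] for col in range(cols)]
--             for row in range(rows)]
-- ===== Notes on version B (the rewrite author's own statement) =====
-- stated objective: alternative
-- what changed: A sequentially constructs a flat assignment list with a running per-country quota counter and then reshapes it by slicing; B builds nothing sequentially: it computes each cell's owner directly by a closed-form index formula (i//(q+1) in the extras zone, else r+(i-r*(q+1))//q) and emits the 2D grid in one nested comprehension.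
import Mathlib
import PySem

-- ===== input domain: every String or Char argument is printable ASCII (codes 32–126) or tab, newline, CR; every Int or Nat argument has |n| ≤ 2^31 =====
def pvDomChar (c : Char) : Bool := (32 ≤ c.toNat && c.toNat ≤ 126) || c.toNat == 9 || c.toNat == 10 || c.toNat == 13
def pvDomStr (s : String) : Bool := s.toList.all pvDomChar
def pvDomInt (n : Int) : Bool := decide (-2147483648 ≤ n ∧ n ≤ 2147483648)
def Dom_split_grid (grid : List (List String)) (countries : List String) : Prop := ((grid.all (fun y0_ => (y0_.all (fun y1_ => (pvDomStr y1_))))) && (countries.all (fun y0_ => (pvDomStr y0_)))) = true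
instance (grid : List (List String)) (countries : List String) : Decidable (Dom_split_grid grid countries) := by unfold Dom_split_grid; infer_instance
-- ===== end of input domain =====

-- B replaces A's sequential per-cell quota loop by a closed-form per-cell owner formula; equivalence proved on non-empty grids (A raises IndexError on [] with countries present).


-- ===== PORT A =====
-- A's cell loop: fuel = remaining cells; state = (flat list built so far, current country index, cell_count, extra_cells).
def pvLoopA (countries : List String) (cpc : Nat) :
    Nat → List String → Nat → Nat → Nat → List String
  | 0, flat, _, _, _ => flat
  | fuel + 1, flat, cci, cellCount, extra =>
    let flat' := flat ++ [countries.getD cci ""]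
    let cc' := cellCount + 1
    if cc' ≥ cpc + (if 0 < extra then 1 else 0) then
      pvLoopA countries cpc fuel flat' (cci + 1) 0 (if 0 < extra then extra - 1 else extra)
    else
      pvLoopA countries cpc fuel flat' cci cc' extra

def split_grid (grid : List (List String)) (countries : List String) : List (List String) :=
  if countries = [] then grid
  else
    let rows := grid.length
    let cols := (grid.headD []).length   -- grid[0]; Python raises IndexError on [] — excluded by Pre_
    let totalCells := rows * cols
    let countryCount := countries.length
    let cellsPerCountry := totalCells / countryCount
    let extraCells := totalCells % countryCount
    let flat := pvLoopA countries cellsPerCountry totalCells [] 0 0 extraCells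
    (List.range rows).map (fun row => ((flat.drop (row * cols)).take cols))

-- ===== PORT B =====
-- B's closed-form owner of flat cell i: first r countries get q+1 cells, the rest q cells.
def pvOwner (q r i : Nat) : Nat :=
  if i < r * (q + 1) then i / (q + 1) else r + (i - r * (q + 1)) / q

def split_grid_alt (grid : List (List String)) (countries : List String) : List (List String) :=
  if countries = [] then grid
  else
    let rows := grid.length
    let cols := (grid.headD []).length   -- grid[0]; raises in Python on [] — excluded by Pre_
    let q := (rows * cols) / countries.length
    let r := (rows * cols) % countries.length
    (List.range rows).map (fun row =>
      (List.range cols).map (fun col => countries.getD (pvOwner q r (row * cols + col)) ""))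

-- ===== PRECONDITION & SPEC =====
-- Pre_ excludes only grid = [] with countries ≠ [], where both Pythons raise IndexError on grid[0].
def Pre_split_grid (grid : List (List String)) (countries : List String) : Prop :=
  countries = [] ∨ grid ≠ []
instance (grid : List (List String)) (countries : List String) : Decidable (Pre_split_grid grid countries) := by unfold Pre_split_grid; infer_instance
def pvWitness_split_grid : List (List String) × List String := ([["x", "y"], ["z", "w"]], ["A", "B", "C"])
def Spec_split_grid (grid : List (List String)) (countries : List String) (out : List (List String)) : Prop := out = split_grid_alt grid countries
instance (grid : List (List String)) (countries : List String) (out : List (List String)) : Decidable (Spec_split_grid grid countries out) := by unfold Spec_split_grid; infer_instance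

-- ===== CLAIM (what is proved, stated in full; the proofs are below) =====
def Claim_equal_split_grid : Prop := ∀ (grid : List (List String)) (countries : List String), Dom_split_grid grid countries → Pre_split_grid grid countries → Spec_split_grid grid countries (split_grid grid countries)

-- ===== LEMMAS AND PROOFS =====

-- An intermediate description of A's flat list: the block form (r blocks of q+1 copies,
-- then blocks of q copies). Used only by the proofs as a bridge between the two ports.
def pvBuildFlat (cpc : Nat) : List String → Nat → List String
  | [], _ => []
  | c :: rest, extra =>
    List.replicate (cpc + (if 0 < extra then 1 else 0)) c ++ pvBuildFlat cpc rest (extra - 1)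

lemma pvLoopA_succ (countries : List String) (cpc fuel : Nat) (flat : List String)
    (cci cc extra : Nat) :
    pvLoopA countries cpc (fuel + 1) flat cci cc extra =
      (if cc + 1 ≥ cpc + (if 0 < extra then 1 else 0) then
        pvLoopA countries cpc fuel (flat ++ [countries.getD cci ""]) (cci + 1) 0
          (if 0 < extra then extra - 1 else extra)
      else
        pvLoopA countries cpc fuel (flat ++ [countries.getD cci ""]) cci (cc + 1) extra) := rfl

lemma pvLoopA_block (countries : List String) (cpc : Nat) :
    ∀ (j cc fuel : Nat) (flat : List String) (cci extra : Nat),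
      cc + j + 1 = cpc + (if 0 < extra then 1 else 0) →
      pvLoopA countries cpc (j + 1 + fuel) flat cci cc extra =
        pvLoopA countries cpc fuel
          (flat ++ List.replicate (j + 1) (countries.getD cci ""))
          (cci + 1) 0 (if 0 < extra then extra - 1 else extra) := by
  intro j
  induction j with
  | zero =>
    intro cc fuel flat cci extra h
    have h1 : 0 + 1 + fuel = fuel + 1 := by omega
    rw [h1, pvLoopA_succ]
    have : cc + 1 ≥ cpc + (if 0 < extra then 1 else 0) := by omega
    simp [this, List.replicate]
  | succ j ih =>
    intro cc fuel flat cci extra h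
    have h1 : j + 1 + 1 + fuel = (j + 1 + fuel) + 1 := by omega
    rw [h1, pvLoopA_succ]
    have hlt : ¬ (cc + 1 ≥ cpc + (if 0 < extra then 1 else 0)) := by omega
    simp only [hlt, if_false]
    rw [ih (cc + 1) fuel _ cci extra (by omega)]
    rw [List.append_assoc]
    simp [List.replicate_succ]

lemma pvBuildFlat_zero_zero (cs : List String) : pvBuildFlat 0 cs 0 = [] := by
  induction cs with
  | nil => rfl
  | cons c rest ih => simp [pvBuildFlat, ih]

-- A's cell loop produces exactly the block form.
lemma pvLoopA_eq_build (countries : List String) (cpc : Nat) :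
    ∀ (cs : List String) (extra cci : Nat) (flat : List String),
      cs = countries.drop cci → extra ≤ cs.length →
      pvLoopA countries cpc (cpc * cs.length + extra) flat cci 0 extra =
        flat ++ pvBuildFlat cpc cs extra := by
  intro cs
  induction cs with
  | nil =>
    intro extra cci flat _ hle
    have : extra = 0 := by simpa using hle
    subst this
    simp [pvLoopA, pvBuildFlat]
  | cons c rest ih =>
    intro extra cci flat hdrop hle
    have hsome : countries[cci]? = some c := by
      have h1 : (countries.drop cci)[0]? = some c := by rw [← hdrop]; rfl
      rw [List.getElem?_drop] at h1
      simpa using h1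
    have hget : countries.getD cci "" = c := by simp [List.getD, hsome]
    have hdrop' : rest = countries.drop (cci + 1) := by
      have := congrArg List.tail hdrop
      simpa [List.tail_drop] using this
    by_cases hex : 0 < extra
    · have hfuel : cpc * (c :: rest).length + extra
          = (cpc + 1) + (cpc * rest.length + (extra - 1)) := by
        simp [List.length_cons]; ring_nf; omega
      rw [hfuel, pvLoopA_block countries cpc cpc 0 _ flat cci extra (by simp [hex])]
      simp only [hex, if_true]
      rw [ih (extra - 1) (cci + 1) _ hdrop' (by simp at hle; omega)]
      simp [pvBuildFlat, hex, hsome, List.append_assoc]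
    · have hex0 : extra = 0 := by omega
      subst hex0
      by_cases hcpc : 0 < cpc
      · have hfuel : cpc * (c :: rest).length + 0
            = (cpc - 1 + 1) + (cpc * rest.length + 0) := by
          simp [List.length_cons]; ring_nf; omega
        rw [hfuel, pvLoopA_block countries cpc (cpc - 1) 0 _ flat cci 0 (by simp; omega)]
        have hIf : (if 0 < 0 then 0 - 1 else 0) = 0 := rfl
        rw [hIf, ih 0 (cci + 1) _ hdrop' (by omega)]
        simp only [pvBuildFlat]
        have : cpc - 1 + 1 = cpc := by omega
        rw [this]
        simp [hsome, List.append_assoc]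
      · have hcpc0 : cpc = 0 := by omega
        subst hcpc0
        simp [pvLoopA, pvBuildFlat_zero_zero, pvBuildFlat]

lemma pvBuildFlat_length (q : Nat) :
    ∀ (cs : List String) (r : Nat), r ≤ cs.length →
      (pvBuildFlat q cs r).length = q * cs.length + r := by
  intro cs
  induction cs with
  | nil => intro r hr; simp at hr; simp [pvBuildFlat, hr]
  | cons c rest ih =>
    intro r hr
    simp only [pvBuildFlat, List.length_append, List.length_replicate]
    rw [ih (r - 1) (by simp at hr ⊢; omega)]
    by_cases h : 0 < r <;> simp [h, List.length_cons] <;> ring_nf <;> omega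

-- owner index shifts by one block
lemma pvOwner_shift_pos (q r i : Nat) (hr : 0 < r) (hi : q + 1 ≤ i) :
    pvOwner q r i = pvOwner q (r - 1) (i - (q + 1)) + 1 := by
  obtain ⟨r', rfl⟩ : ∃ r', r = r' + 1 := ⟨r - 1, by omega⟩
  simp only [pvOwner, Nat.add_sub_cancel]
  have hmul : (r' + 1) * (q + 1) = r' * (q + 1) + (q + 1) := by ring
  by_cases h : i < (r' + 1) * (q + 1)
  · have h' : i - (q + 1) < r' * (q + 1) := by omega
    simp only [h, h', if_true]
    conv_lhs => rw [show i = (i - (q + 1)) + (q + 1) from by omega]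
    rw [Nat.add_div_right _ (by omega)]
  · have h' : ¬ (i - (q + 1) < r' * (q + 1)) := by omega
    simp only [h, h', if_false]
    have : i - (q + 1) - r' * (q + 1) = i - (r' + 1) * (q + 1) := by omega
    rw [this]; omega

lemma pvOwner_shift_zero (q i : Nat) (hq : 0 < q) (hi : q ≤ i) :
    pvOwner q 0 i = pvOwner q 0 (i - q) + 1 := by
  simp only [pvOwner, Nat.zero_mul, Nat.not_lt_zero, if_false, Nat.zero_add, Nat.sub_zero]
  conv_lhs => rw [show i = (i - q) + q from by omega]
  rw [Nat.add_div_right _ hq]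

-- Per-index characterisation of the block form: cell i belongs to country pvOwner q r i.
lemma pvBuildFlat_getElem (q : Nat) :
    ∀ (cs : List String) (r i : Nat), r ≤ cs.length → i < q * cs.length + r →
      (pvBuildFlat q cs r)[i]? = cs[pvOwner q r i]? := by
  intro cs
  induction cs with
  | nil => intro r i hr hi; simp at hr; subst hr; simp at hi
  | cons c rest ih =>
    intro r i hr hi
    by_cases hrpos : 0 < r
    · simp only [pvBuildFlat, hrpos, if_true]
      by_cases hib : i < q + 1
      · rw [List.getElem?_append_left (by simpa using hib)]
        have howner : pvOwner q r i = 0 := by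
          have hlt : i < r * (q + 1) := by
            calc i < q + 1 := hib
            _ ≤ r * (q + 1) := by nlinarith
          simp [pvOwner, hlt, Nat.div_eq_of_lt hib]
        rw [howner]
        simp [hib]
      · rw [List.getElem?_append_right (by simpa using Nat.le_of_not_lt hib)]
        simp only [List.length_replicate]
        rw [ih (r - 1) (i - (q + 1)) (by simp at hr ⊢; omega)
          (by simp [List.length_cons] at hi; ring_nf at hi ⊢; omega)]
        rw [pvOwner_shift_pos q r i hrpos (by omega)]
        simp
    · have hr0 : r = 0 := by omega
      subst hr0
      simp only [pvBuildFlat, Nat.lt_irrefl, if_false, Nat.add_zero, Nat.zero_sub]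
      have hq : 0 < q := by
        rcases Nat.eq_zero_or_pos q with h | h
        · subst h; simp at hi
        · exact h
      by_cases hib : i < q
      · rw [List.getElem?_append_left (by simpa using hib)]
        have howner : pvOwner q 0 i = 0 := by
          simp [pvOwner, Nat.div_eq_of_lt hib]
        rw [howner]
        simp [hib]
      · rw [List.getElem?_append_right (by simpa using Nat.le_of_not_lt hib)]
        simp only [List.length_replicate]
        rw [ih 0 (i - q) (by omega)
          (by simp [List.length_cons] at hi; ring_nf at hi ⊢; omega)]
        rw [pvOwner_shift_zero q i hq (by omega)]
        simp

-- ===== VERDICT (by name: the statement is the Claim_ definition above) =====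
theorem split_grid_spec : Claim_equal_split_grid := by
  intro grid countries _ hpre
  unfold Spec_split_grid split_grid split_grid_alt
  by_cases hc : countries = []
  · simp [hc]
  · simp only [hc, if_false]
    have hn : 0 < countries.length := List.length_pos_iff.mpr hc
    set rows := grid.length
    set cols := (grid.headD []).length
    set total := rows * cols with htotal
    set n := countries.length
    set q := total / n
    set r := total % n
    have hmod : r < n := Nat.mod_lt _ hn
    have e : q * countries.length + r = total := by
      calc q * countries.length + r = n * q + r := by rw [Nat.mul_comm]
        _ = total := Nat.div_add_mod total n
    have hflat : pvLoopA countries q total [] 0 0 r = pvBuildFlat q countries r := by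
      have h := pvLoopA_eq_build countries q countries r 0 [] (by simp) (le_of_lt hmod)
      rw [e] at h
      simpa using h
    simp only [hflat]
    apply List.map_congr_left
    intro row hrow
    rw [List.mem_range] at hrow
    apply List.ext_getElem?
    intro j
    by_cases hj : j < cols
    · have hi : row * cols + j < total := by
        have h1 : row * cols + j < (row + 1) * cols := by ring_nf; omega
        have h2 : (row + 1) * cols ≤ rows * cols := Nat.mul_le_mul_right _ (by omega)
        omega
      have hflen : (pvBuildFlat q countries r).length = total := by
        rw [pvBuildFlat_length q countries r (le_of_lt hmod), e]
      have hcell : (pvBuildFlat q countries r)[row * cols + j]?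
          = countries[pvOwner q r (row * cols + j)]? := by
        rw [pvBuildFlat_getElem q countries r _ (le_of_lt hmod) (by omega)]
      have hsome : ∃ v, (pvBuildFlat q countries r)[row * cols + j]? = some v := by
        exact ⟨_, List.getElem?_eq_getElem (by omega)⟩
      obtain ⟨v, hv⟩ := hsome
      have hcv : countries[pvOwner q r (row * cols + j)]? = some v := by
        rw [← hcell]; exact hv
      rw [List.getElem?_take, List.getElem?_drop]
      simp only [hj, if_true, hv]
      rw [List.getElem?_map, List.getElem?_range hj]
      simp [List.getD_eq_getElem?_getD, hcv]
    · rw [List.getElem?_take]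
      simp only [hj, if_false]
      symm
      apply List.getElem?_eq_none
      simp
      omega
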